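-- pv_equiv track=rewrite | github.com/jaredhhawk/the-dossier | pipeline/score_v2.py | score_role_match
-- ===== SOURCE A (Python) =====
-- PM_TITLES = [
--     "product manager", "product owner", "product lead",
--     "product director", "head of product", "vp product",
--     "product operations", "product ops",
-- ]
--
-- def score_role_match(title_lower, desc_lower):
--     """Score 1-5. How well title/responsibilities align with resume. Kept but downweighted."""
--     score = 2  # base: most roles partially match some experience
--
--     # Direct PM title match
--     if any(pm in title_lower for pm in PM_TITLES):
--         score = 5
--     # PM-adjacent
--     elif any(k in title_lower for k in ["program manager", "chief of staff", "customer success"]):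
--         score = 4
--     # Tech/AI roles
--     elif any(k in title_lower for k in ["ai ", "machine learning", "solutions engineer"]):
--         score = 4
--     # Operations (transferable)
--     elif any(k in title_lower for k in ["operations manager", "business operations", "project manager"]):
--         score = 3
--     # Lane B (less direct match)
--     elif any(k in title_lower for k in ["construction", "procurement", "facilities", "property manager", "logistics"]):
--         score = 2
--
--     return score
-- ===== SOURCE B (Python) =====
-- # One flat keyword->score table, scanned once with a running-max accumulator.
-- # Correct vs the first-match ladder because the ladder's scores are non-increasing
-- # (5,4,4,3,2), so the maximum matching score equals the first matching rule's score,
-- # and the base 2 is a lower bound of every score.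
-- KEYWORD_SCORES = [
--     ("product manager", 5), ("product owner", 5), ("product lead", 5),
--     ("product director", 5), ("head of product", 5), ("vp product", 5),
--     ("product operations", 5), ("product ops", 5),
--     ("program manager", 4), ("chief of staff", 4), ("customer success", 4),
--     ("ai ", 4), ("machine learning", 4), ("solutions engineer", 4),
--     ("operations manager", 3), ("business operations", 3), ("project manager", 3),
--     ("construction", 2), ("procurement", 2), ("facilities", 2),
--     ("property manager", 2), ("logistics", 2),
-- ]
--
-- def score_role_match(title_lower, desc_lower):
--     """Score 1-5. How well title/responsibilities align with resume."""
--     best = 2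
--     for k, s in KEYWORD_SCORES:
--         if k in title_lower:
--             best = max(best, s)
--     return best
-- ===== Notes on version B (the rewrite author's own statement) =====
-- stated objective: alternative
-- what changed: Replaced the first-match if/elif ladder over keyword groups by a single running-max accumulator pass over one flat keyword-to-score table; equal because the ladder's scores are non-increasing so max-of-matches equals first-match, with base 2 a lower bound.
import Mathlib
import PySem

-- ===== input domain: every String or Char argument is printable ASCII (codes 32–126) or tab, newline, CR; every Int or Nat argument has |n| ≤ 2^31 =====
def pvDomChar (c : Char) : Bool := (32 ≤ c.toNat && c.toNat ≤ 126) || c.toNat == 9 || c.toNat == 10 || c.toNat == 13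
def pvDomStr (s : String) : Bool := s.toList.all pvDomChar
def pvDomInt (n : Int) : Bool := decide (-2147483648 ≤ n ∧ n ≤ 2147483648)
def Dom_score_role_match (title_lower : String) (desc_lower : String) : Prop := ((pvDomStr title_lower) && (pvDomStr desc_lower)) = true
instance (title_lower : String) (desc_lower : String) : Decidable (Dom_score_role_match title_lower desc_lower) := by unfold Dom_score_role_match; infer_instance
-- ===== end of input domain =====

-- B replaces A's first-match if/elif ladder by one running-max pass over a flat keyword->score table (alternative algorithm; same cost).

-- ===== PORT A =====
def PM_TITLES : List String :=
  ["product manager", "product owner", "product lead",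
   "product director", "head of product", "vp product",
   "product operations", "product ops"]

def score_role_match (title_lower : String) (desc_lower : String) : Int :=
  let score : Int := 2
  if PM_TITLES.any (fun k => PySem.Str.isIn k title_lower) then 5
  else if ["program manager", "chief of staff", "customer success"].any (fun k => PySem.Str.isIn k title_lower) then 4
  else if ["ai ", "machine learning", "solutions engineer"].any (fun k => PySem.Str.isIn k title_lower) then 4
  else if ["operations manager", "business operations", "project manager"].any (fun k => PySem.Str.isIn k title_lower) then 3
  else if ["construction", "procurement", "facilities", "property manager", "logistics"].any (fun k => PySem.Str.isIn k title_lower) then 2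
  else score

-- ===== PORT B =====
def KEYWORD_SCORES : List (String × Int) :=
  [("product manager", 5), ("product owner", 5), ("product lead", 5),
   ("product director", 5), ("head of product", 5), ("vp product", 5),
   ("product operations", 5), ("product ops", 5),
   ("program manager", 4), ("chief of staff", 4), ("customer success", 4),
   ("ai ", 4), ("machine learning", 4), ("solutions engineer", 4),
   ("operations manager", 3), ("business operations", 3), ("project manager", 3),
   ("construction", 2), ("procurement", 2), ("facilities", 2),
   ("property manager", 2), ("logistics", 2)]

def score_role_match_alt (title_lower : String) (desc_lower : String) : Int :=
  KEYWORD_SCORES.foldl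
    (fun best ks => if PySem.Str.isIn ks.1 title_lower then max best ks.2 else best) 2

-- ===== PRECONDITION & SPEC =====
def Spec_score_role_match (title_lower : String) (desc_lower : String) (out : Int) : Prop := out = score_role_match_alt title_lower desc_lower
instance (title_lower : String) (desc_lower : String) (out : Int) : Decidable (Spec_score_role_match title_lower desc_lower out) := by unfold Spec_score_role_match; infer_instance

-- ===== CLAIM (what is proved, stated in full; the proofs are below) =====
def Claim_equal_score_role_match : Prop := ∀ (title_lower : String) (desc_lower : String), Dom_score_role_match title_lower desc_lower → Spec_score_role_match title_lower desc_lower (score_role_match title_lower desc_lower)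

-- ===== LEMMAS AND PROOFS =====

-- ===== VERDICT (by name: the statement is the Claim_ definition above) =====
-- one group of keywords, all with the same score s, folded with the running max
theorem fold_group (t : String) (g : List String) (s : Int) (b : Int) :
    (g.map (fun k => (k, s))).foldl
      (fun best ks => if PySem.Str.isIn ks.1 t then max best ks.2 else best) b
    = if g.any (fun k => PySem.Str.isIn k t) then max b s else b := by
  induction g generalizing b with
  | nil => rfl
  | cons h rest ih =>
    simp only [List.map_cons, List.foldl_cons, List.any_cons]
    by_cases hc : PySem.Str.isIn h t = true
    · rw [show (if PySem.Str.isIn (h, s).1 t = true then max b s else b) = max b s from if_pos hc,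
          ih]
      simp only [hc, Bool.true_or]
      rw [if_pos trivial]
      split
      · rw [max_assoc, max_self]
      · rfl
    · rw [show (if PySem.Str.isIn (h, s).1 t = true then max b s else b) = b from if_neg hc, ih]
      rw [Bool.not_eq_true] at hc
      simp only [hc, Bool.false_or]

theorem score_role_match_spec : Claim_equal_score_role_match := by
  intro t d _
  unfold Spec_score_role_match score_role_match score_role_match_alt
  have hP : KEYWORD_SCORES
      = (PM_TITLES.map (fun k => (k, (5:Int))))
        ++ (["program manager", "chief of staff", "customer success"].map (fun k => (k, (4:Int))))
        ++ (["ai ", "machine learning", "solutions engineer"].map (fun k => (k, (4:Int))))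
        ++ (["operations manager", "business operations", "project manager"].map (fun k => (k, (3:Int))))
        ++ (["construction", "procurement", "facilities", "property manager", "logistics"].map (fun k => (k, (2:Int)))) := by
    rfl
  rw [hP]
  simp only [List.foldl_append, fold_group]
  split_ifs <;> decide
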